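-- pv_equiv track=rewrite | github.com/hongyiheng/lc-base-on-doocs | Hash Table/0828.Count Unique Characters of All Substrings of a Given String/Solution.py | uniqueLetterString
-- ===== SOURCE A (Python) =====
-- def uniqueLetterString(s: str) -> int:
--     n = len(s)
--     mp = dict()
--     l, r = [0] * n, [0] * n
--     for i, c in enumerate(s):
--         l[i] = mp.get(c, -1)
--         mp[c] = i
--     mp.clear()
--     for i in range(n - 1, -1, -1):
--         c = s[i]
--         r[i] = mp.get(c, n)
--         mp[c] = i
--     ans = 0
--     for i in range(n):
--         ans += (i - l[i]) * (r[i] - i)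
--     return ans
-- ===== SOURCE B (Python) =====
-- def uniqueLetterString(s: str) -> int:
--     n = len(s)
--     ans = 0
--     for i in range(n):
--         c = s[i]
--         p = i - 1
--         while p >= 0 and s[p] != c:
--             p -= 1
--         q = i + 1
--         while q < n and s[q] != c:
--             q += 1
--         ans += (i - p) * (q - i)
--     return ans
-- ===== Notes on version B (the rewrite author's own statement) =====
-- stated objective: alternative
-- what changed: B drops A's dict-built l/r boundary arrays and three passes entirely: for each index it finds the previous and next occurrence of the character by direct scans and accumulates (i-p)*(q-i) in one loop.
import Mathlib
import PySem

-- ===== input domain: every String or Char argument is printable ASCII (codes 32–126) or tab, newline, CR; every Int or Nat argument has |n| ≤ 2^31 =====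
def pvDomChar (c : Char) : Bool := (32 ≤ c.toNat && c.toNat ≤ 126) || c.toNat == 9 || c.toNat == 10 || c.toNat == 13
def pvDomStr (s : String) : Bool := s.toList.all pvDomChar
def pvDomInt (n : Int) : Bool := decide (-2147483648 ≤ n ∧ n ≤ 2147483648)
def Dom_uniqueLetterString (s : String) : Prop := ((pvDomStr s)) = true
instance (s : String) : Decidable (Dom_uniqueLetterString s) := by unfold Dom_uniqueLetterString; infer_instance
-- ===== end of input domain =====

-- B replaces A's three passes (two dict passes building the l/r boundary arrays plus a
-- summing pass) by a single loop that scans outward for the previous/next occurrence of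
-- each character; not faster, but a plainly different decomposition with no arrays or dicts.

-- ===== PORT A =====
def uniqueLetterString (s : String) : Int :=
  let cs := s.toList
  let n := cs.length
  let st1 := (PySem.List.enumerate cs 0).foldl
    (fun (st : List Int × PySem.Dict Char Int) p =>
      (PySem.List.pySetD st.1 p.1 (st.2.getD p.2 (-1)), st.2.insert p.2 p.1))
    (List.replicate n 0, PySem.Dict.empty)
  let l := st1.1
  let st2 := (PySem.List.pyRange ((n : Int) - 1) (-1) (-1)).foldl
    (fun (st : List Int × PySem.Dict Char Int) i =>
      let c := PySem.List.pyGetD cs i ' '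
      (PySem.List.pySetD st.1 i (st.2.getD c (n : Int)), st.2.insert c i))
    (List.replicate n 0, PySem.Dict.empty)
  let r := st2.1
  (PySem.List.pyRange 0 (n : Int) 1).foldl
    (fun ans i => ans + (i - PySem.List.pyGetD l i 0) * (PySem.List.pyGetD r i 0 - i)) 0

-- ===== PORT B =====
-- `while p >= 0 and s[p] != c: p -= 1`  (index p is in range whenever it is read)
def prevScan (cs : List Char) (c : Char) (p : Int) : Int :=
  if 0 ≤ p ∧ PySem.List.pyGetD cs p ' ' ≠ c then prevScan cs c (p - 1) else p
termination_by (p + 1).toNat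
decreasing_by omega

-- `while q < n and s[q] != c: q += 1`
def nextScan (cs : List Char) (c : Char) (n q : Int) : Int :=
  if q < n ∧ PySem.List.pyGetD cs q ' ' ≠ c then nextScan cs c n (q + 1) else q
termination_by (n - q).toNat
decreasing_by omega

def uniqueLetterString_alt (s : String) : Int :=
  let cs := s.toList
  let n := PySem.List.len cs
  (PySem.List.pyRange 0 n 1).foldl
    (fun ans i =>
      let c := PySem.List.pyGetD cs i ' '
      ans + (i - prevScan cs c (i - 1)) * (nextScan cs c n (i + 1) - i)) 0

-- ===== PRECONDITION & SPEC =====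
def Spec_uniqueLetterString (s : String) (out : Int) : Prop := out = uniqueLetterString_alt s
instance (s : String) (out : Int) : Decidable (Spec_uniqueLetterString s out) := by unfold Spec_uniqueLetterString; infer_instance

-- ===== CLAIM (what is proved, stated in full; the proofs are below) =====
def Claim_equal_uniqueLetterString : Prop := ∀ (s : String), Dom_uniqueLetterString s → Spec_uniqueLetterString s (uniqueLetterString s)

-- ===== LEMMAS AND PROOFS =====

theorem prevScan_neg (cs : List Char) (c : Char) (p : Int) (h : p < 0) :
    prevScan cs c p = p := by
  unfold prevScan; simp [not_le.mpr h]

theorem prevScan_step (cs : List Char) (c : Char) (k : Nat) (hk : k < cs.length) :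
    prevScan cs c (k : Int) = if cs[k] = c then (k : Int) else prevScan cs c ((k : Int) - 1) := by
  rw [prevScan]
  by_cases hc : cs[k] = c <;>
    simp [PySem.List.pyGetD_natCast, List.getElem?_eq_getElem hk, hc]

theorem nextScan_step (cs : List Char) (c : Char) (k : Nat) (hk : k < cs.length) :
    nextScan cs c (cs.length : Int) (k : Int) =
      if cs[k] = c then (k : Int) else nextScan cs c (cs.length : Int) ((k : Int) + 1) := by
  rw [nextScan]
  by_cases hc : cs[k] = c <;>
    simp [PySem.List.pyGetD_natCast, List.getElem?_eq_getElem hk, hc,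
      (by exact_mod_cast hk : (k : Int) < (cs.length : Int))]

theorem nextScan_end (cs : List Char) (c : Char) (n : Int) :
    nextScan cs c n n = n := by
  unfold nextScan; simp

-- invariant of A's first (forward) loop: every filled slot of l holds prevScan's value
theorem fold1_inv (cs : List Char) (rest : List Char) :
    ∀ (pre : List Char) (l : List Int) (mp : PySem.Dict Char Int),
    cs = pre ++ rest →
    l.length = cs.length →
    (∀ c, mp.getD c (-1) = prevScan cs c ((pre.length : Int) - 1)) →
    (∀ (j : Nat) (hj : j < cs.length), j < pre.length →
        l.getD j 0 = prevScan cs (cs[j]'hj) ((j : Int) - 1)) →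
    ((PySem.List.enumerate rest (pre.length : Int)).foldl
      (fun (st : List Int × PySem.Dict Char Int) p =>
        (PySem.List.pySetD st.1 p.1 (st.2.getD p.2 (-1)), st.2.insert p.2 p.1))
      (l, mp)).1.length = cs.length ∧
    (∀ (j : Nat) (hj : j < cs.length),
      ((PySem.List.enumerate rest (pre.length : Int)).foldl
        (fun (st : List Int × PySem.Dict Char Int) p =>
          (PySem.List.pySetD st.1 p.1 (st.2.getD p.2 (-1)), st.2.insert p.2 p.1))
        (l, mp)).1.getD j 0 = prevScan cs (cs[j]'hj) ((j : Int) - 1)) := by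
  induction rest with
  | nil =>
    intro pre l mp hcs hlen hmp hl
    simp only [List.append_nil] at hcs
    subst hcs
    refine ⟨by simpa [PySem.List.enumerate] using hlen, fun j hj => ?_⟩
    simpa [PySem.List.enumerate] using hl j hj hj
  | cons x rest ih =>
    intro pre l mp hcs hlen hmp hl
    have hm : pre.length < cs.length := by subst hcs; simp
    have hx : cs[pre.length]'hm = x := by
      subst hcs; rw [List.getElem_append_right (le_refl _)]; simp
    rw [PySem.List.enumerate_cons, List.foldl_cons]
    have hset : PySem.List.pySetD l ((pre.length : Nat) : Int) (mp.getD x (-1))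
        = l.set pre.length (mp.getD x (-1)) := by
      simp
    have hcs' : cs = (pre ++ [x]) ++ rest := by simp [hcs]
    have hlen' : ((pre ++ [x]).length : Int) = (pre.length : Int) + 1 := by
      simp
    have hmp' : ∀ c, (mp.insert x (pre.length : Int)).getD c (-1)
        = prevScan cs c (((pre ++ [x]).length : Int) - 1) := by
      intro c
      have hstep := prevScan_step cs c pre.length hm
      rw [hx] at hstep
      rw [PySem.Dict.getD_insert, hlen', add_sub_cancel_right, hstep]
      by_cases hcx : c = x
      · simp [hcx]
      · have hxc : ¬ (x = c) := fun h => hcx h.symm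
        simp [hcx, hxc, hmp c]
    have hl' : ∀ (j : Nat) (hj : j < cs.length), j < (pre ++ [x]).length →
        (l.set pre.length (mp.getD x (-1))).getD j 0
          = prevScan cs (cs[j]'hj) ((j : Int) - 1) := by
      intro j hj hjlt
      simp only [List.length_append, List.length_singleton] at hjlt
      by_cases hje : j = pre.length
      · have hv : (l.set pre.length (mp.getD x (-1))).getD j 0 = mp.getD x (-1) := by
          rw [List.getD_eq_getElem?_getD, hje, List.getElem?_set_self (by omega)]
          simp
        have hcj : cs[j]'hj = x := by subst hje; exact hx
        rw [hv, hmp x, hcj, hje]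
      · have : (l.set pre.length (mp.getD x (-1))).getD j 0 = l.getD j 0 := by
          rw [List.getD_eq_getElem?_getD, List.getElem?_set_ne (fun h => hje h.symm),
            ← List.getD_eq_getElem?_getD]
        rw [this]
        exact hl j hj (by omega)
    have := ih (pre ++ [x]) (l.set pre.length (mp.getD x (-1)))
      (mp.insert x (pre.length : Int)) hcs' (by simp [hlen]) hmp' hl'
    rw [hlen'] at this
    simpa [hset] using this

-- invariant of A's second (backward) loop
theorem fold2_inv (cs : List Char) :
    ∀ (m : Nat) (r : List Int) (mp : PySem.Dict Char Int),
    m ≤ cs.length →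
    r.length = cs.length →
    (∀ c, mp.getD c (cs.length : Int) = nextScan cs c (cs.length : Int) (m : Int)) →
    (∀ (j : Nat) (hj : j < cs.length), m ≤ j →
        r.getD j 0 = nextScan cs (cs[j]'hj) (cs.length : Int) ((j : Int) + 1)) →
    ((PySem.List.pyRange ((m : Int) - 1) (-1) (-1)).foldl
      (fun (st : List Int × PySem.Dict Char Int) i =>
        (PySem.List.pySetD st.1 i (st.2.getD (PySem.List.pyGetD cs i ' ') (cs.length : Int)),
         st.2.insert (PySem.List.pyGetD cs i ' ') i))
      (r, mp)).1.length = cs.length ∧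
    (∀ (j : Nat) (hj : j < cs.length),
      ((PySem.List.pyRange ((m : Int) - 1) (-1) (-1)).foldl
        (fun (st : List Int × PySem.Dict Char Int) i =>
          (PySem.List.pySetD st.1 i (st.2.getD (PySem.List.pyGetD cs i ' ') (cs.length : Int)),
           st.2.insert (PySem.List.pyGetD cs i ' ') i))
        (r, mp)).1.getD j 0 = nextScan cs (cs[j]'hj) (cs.length : Int) ((j : Int) + 1)) := by
  intro m
  induction m with
  | zero =>
    intro r mp _ hlen hmp hr
    rw [PySem.List.pyRange_neg_one_eq_nil (by norm_num)]
    exact ⟨hlen, fun j hj => hr j hj (Nat.zero_le j)⟩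
  | succ m ih =>
    intro r mp hmn hlen hmp hr
    have hm : m < cs.length := by omega
    have hgc : PySem.List.pyGetD cs ((m : Nat) : Int) ' ' = cs[m]'hm := by
      simp [List.getElem?_eq_getElem hm]
    have hcast : ((m + 1 : Nat) : Int) - 1 = (m : Nat) := by push_cast; ring
    rw [hcast, PySem.List.pyRange_neg_one_cons (by omega), List.foldl_cons]
    have hmp' : ∀ c, ((mp.insert (cs[m]'hm) ((m : Nat) : Int)).getD c (cs.length : Int))
        = nextScan cs c (cs.length : Int) ((m : Nat) : Int) := by
      intro c
      have hstepc := nextScan_step cs c m hm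
      rw [PySem.Dict.getD_insert]
      by_cases hcx : c = cs[m]'hm
      · rw [if_pos hcx, hstepc, if_pos hcx.symm]
      · have hxc : ¬ (cs[m]'hm = c) := fun h => hcx h.symm
        rw [if_neg hcx, hmp c, hstepc, if_neg hxc]
        norm_cast
    have hr' : ∀ (j : Nat) (hj : j < cs.length), m ≤ j →
        (r.set m (mp.getD (cs[m]'hm) (cs.length : Int))).getD j 0
          = nextScan cs (cs[j]'hj) (cs.length : Int) ((j : Int) + 1) := by
      intro j hj hjm
      by_cases hje : j = m
      · have hv : (r.set m (mp.getD (cs[m]'hm) (cs.length : Int))).getD j 0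
            = mp.getD (cs[m]'hm) (cs.length : Int) := by
          rw [List.getD_eq_getElem?_getD, hje, List.getElem?_set_self (by omega)]
          simp
        have hcj : cs[j]'hj = cs[m]'hm := by subst hje; rfl
        rw [hv, hmp (cs[m]'hm), hcj, hje]
        norm_cast
      · have hv : (r.set m (mp.getD (cs[m]'hm) (cs.length : Int))).getD j 0 = r.getD j 0 := by
          rw [List.getD_eq_getElem?_getD, List.getElem?_set_ne (fun h => hje h.symm),
            ← List.getD_eq_getElem?_getD]
        rw [hv]
        exact hr j hj (by omega)
    have := ih (r.set m (mp.getD (cs[m]'hm) (cs.length : Int)))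
      (mp.insert (cs[m]'hm) ((m : Nat) : Int)) (by omega) (by simp [hlen]) hmp' hr'
    simpa [hgc] using this

-- ===== VERDICT (by name: the statement is the Claim_ definition above) =====
theorem uniqueLetterString_spec : Claim_equal_uniqueLetterString := by
  intro s _
  unfold Spec_uniqueLetterString uniqueLetterString uniqueLetterString_alt
  set cs := s.toList with hcs
  simp only [PySem.List.len_eq]
  obtain ⟨hl_len, hl⟩ := fold1_inv cs cs [] (List.replicate cs.length 0) PySem.Dict.empty
    (by simp) (by simp)
    (fun c => by simp [prevScan_neg cs c (-1) (by norm_num)])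
    (fun j hj h => by simp at h)
  obtain ⟨hr_len, hr⟩ := fold2_inv cs cs.length (List.replicate cs.length 0) PySem.Dict.empty
    (le_refl _) (by simp)
    (fun c => by simp [nextScan_end])
    (fun j hj h => by omega)
  simp only [List.length_nil, Nat.cast_zero] at hl
  refine PySem.List.foldl_congr_mem _ _ _ _ ?_
  intro ans i hi
  rw [PySem.List.mem_pyRange_one] at hi
  obtain ⟨h0, hn⟩ := hi
  obtain ⟨k, rfl⟩ : ∃ k : Nat, i = (k : Int) := ⟨i.toNat, (Int.toNat_of_nonneg h0).symm⟩
  have hk : k < cs.length := by exact_mod_cast hn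
  have hgc : PySem.List.pyGetD cs ((k : Nat) : Int) ' ' = cs[k]'hk := by
    simp [List.getElem?_eq_getElem hk]
  rw [hgc]
  have h1 : PySem.List.pyGetD
      ((PySem.List.enumerate cs 0).foldl
        (fun (st : List Int × PySem.Dict Char Int) p =>
          (PySem.List.pySetD st.1 p.1 (st.2.getD p.2 (-1)), st.2.insert p.2 p.1))
        (List.replicate cs.length 0, PySem.Dict.empty)).1 ((k : Nat) : Int) 0
      = prevScan cs (cs[k]'hk) ((k : Int) - 1) := by
    rw [PySem.List.pyGetD_natCast]
    exact hl k hk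
  have h2 : PySem.List.pyGetD
      ((PySem.List.pyRange ((cs.length : Int) - 1) (-1) (-1)).foldl
        (fun (st : List Int × PySem.Dict Char Int) i =>
          (PySem.List.pySetD st.1 i (st.2.getD (PySem.List.pyGetD cs i ' ') (cs.length : Int)),
           st.2.insert (PySem.List.pyGetD cs i ' ') i))
        (List.replicate cs.length 0, PySem.Dict.empty)).1 ((k : Nat) : Int) 0
      = nextScan cs (cs[k]'hk) (cs.length : Int) ((k : Int) + 1) := by
    rw [PySem.List.pyGetD_natCast]
    exact hr k hk
  rw [h1, h2]
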